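-- pv_equiv track=rewrite | github.com/blackcoster/bus_optimizer | optimizer.py | encode_routes
-- ===== SOURCE A (Python) =====
-- def encode_routes(routes_list):
--     # creates a one big chromosome of all routes together (long) and a splits dict to extract them by indexes from it later
--     long = []
--     splits = {}
--     start=0
--     for k in routes_list.keys():
--         long.extend(routes_list[k])
--         splits[k] = (start,start+len(routes_list[k]))
--         start+=len(routes_list[k])
--     return long, splits
-- ===== SOURCE B (Python) =====
-- def encode_routes(routes_list):
--     # Structure first, payload second: compute per-key lengths and cumulative
--     # offsets, derive the splits dict from consecutive offset pairs, then
--     # concatenate all routes in one separate pass.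
--     keys = list(routes_list)
--     lengths = [len(routes_list[k]) for k in keys]
--     offsets = [0]
--     t = 0
--     for n in lengths:
--         t += n
--         offsets.append(t)
--     splits = dict(zip(keys, zip(offsets, offsets[1:])))
--     long = [x for k in keys for x in routes_list[k]]
--     return long, splits
-- ===== Notes on version B (the rewrite author's own statement) =====
-- stated objective: alternative
-- what changed: Replaces A's single fused loop (extend + dict insert + running counter) with a two-phase decomposition: first build the offset table from the per-key lengths, derive splits by zipping keys with consecutive offset pairs, then concatenate the payload in a separate flattening pass.
import Mathlib
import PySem

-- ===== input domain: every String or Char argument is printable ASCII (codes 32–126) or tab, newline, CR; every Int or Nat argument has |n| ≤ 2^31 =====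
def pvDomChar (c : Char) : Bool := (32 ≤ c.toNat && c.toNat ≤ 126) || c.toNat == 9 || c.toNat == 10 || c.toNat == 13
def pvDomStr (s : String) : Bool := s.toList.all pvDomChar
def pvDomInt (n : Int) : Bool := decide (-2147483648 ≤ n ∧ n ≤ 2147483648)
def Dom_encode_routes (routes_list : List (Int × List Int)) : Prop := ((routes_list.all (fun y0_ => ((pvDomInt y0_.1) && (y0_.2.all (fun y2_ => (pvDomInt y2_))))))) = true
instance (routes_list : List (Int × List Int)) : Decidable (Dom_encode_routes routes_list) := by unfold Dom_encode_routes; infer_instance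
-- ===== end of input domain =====

-- B decomposes A's fused loop into an offset-table pass plus a separate concatenation pass (objective: alternative; return values proved equal on dicts, i.e. nodup keys).

-- ===== PORT A =====
-- A: one fused loop over the keys, extending `long`, inserting into `splits`, advancing `start`.
def encode_routes (routes_list : List (Int × List Int)) : List Int × (List (Int × Int × Int)) :=
  let d := PySem.Dict.mk routes_list
  let st := (PySem.Dict.keys d).foldl
    (fun (st : List Int × PySem.Dict Int (Int × Int) × Int) k =>
      let v := d.getD k []          -- routes_list[k] (k comes from keys(), so present)
      (st.1 ++ v, st.2.1.insert k (st.2.2, st.2.2 + PySem.List.len v), st.2.2 + PySem.List.len v))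
    ([], PySem.Dict.mk [], 0)
  (st.1, st.2.1.items)

-- ===== PORT B =====
-- B: lengths per key, cumulative offsets, splits = dict(zip(keys, zip(offsets, offsets[1:]))), long = flatten.
-- dict(zip(keys, …)) on the distinct keys of a dict is exactly the zipped association list.
def encode_routes_alt (routes_list : List (Int × List Int)) : List Int × (List (Int × Int × Int)) :=
  let d := PySem.Dict.mk routes_list
  let keys := PySem.Dict.keys d                                   -- list(routes_list)
  let lengths := keys.map (fun k => PySem.List.len (d.getD k [])) -- [len(routes_list[k]) for k in keys]
  let p := lengths.foldl (fun (st : List Int × Int) n => (st.1 ++ [st.2 + n], st.2 + n)) ([0], 0)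
  let offsets := p.1
  let splits := keys.zip (offsets.zip offsets.tail)
  let long := keys.flatMap (fun k => d.getD k [])                 -- [x for k in keys for x in routes_list[k]]
  (long, splits)

-- ===== PRECONDITION & SPEC =====
-- A Python dict cannot carry duplicate keys, so Pre_ restricts the association list
-- (the Lean image of the dict) to its natural domain: pairwise-distinct keys.
def Pre_encode_routes (routes_list : List (Int × List Int)) : Prop :=
  (routes_list.map Prod.fst).Nodup
instance (routes_list : List (Int × List Int)) : Decidable (Pre_encode_routes routes_list) := by unfold Pre_encode_routes; infer_instance

def pvWitness_encode_routes : (List (Int × List Int)) := [(1, [2, 3]), (4, []), (-2, [7])]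

def Spec_encode_routes (routes_list : List (Int × List Int)) (out : List Int × (List (Int × Int × Int))) : Prop := out = encode_routes_alt routes_list
instance (routes_list : List (Int × List Int)) (out : List Int × (List (Int × Int × Int))) : Decidable (Spec_encode_routes routes_list out) := by unfold Spec_encode_routes; infer_instance

-- ===== CLAIM (what is proved, stated in full; the proofs are below) =====
def Claim_equal_encode_routes : Prop := ∀ (routes_list : List (Int × List Int)), Dom_encode_routes routes_list → Pre_encode_routes routes_list → Spec_encode_routes routes_list (encode_routes routes_list)

-- ===== LEMMAS AND PROOFS =====

-- the splits table both programs denote: (k, t, t + len (val k)) with a running offset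
def spFrom (val : Int → List Int) (t : Int) : List Int → List (Int × Int × Int)
  | [] => []
  | k :: ks => (k, t, t + PySem.List.len (val k)) :: spFrom val (t + PySem.List.len (val k)) ks

-- the cumulative offsets after t over a list of lengths
def cumFrom (t : Int) : List Int → List Int
  | [] => []
  | n :: ns => (t + n) :: cumFrom (t + n) ns

theorem insert_fresh_append {k : Int} {v : Int × Int} (d : PySem.Dict Int (Int × Int))
    (h : d.contains k = false) : d.insert k v = PySem.Dict.mk (d.items ++ [(k, v)]) := by
  apply PySem.Dict.ext
  simpa using PySem.Dict.items_foldl_insert_fresh [k] id (fun _ => v) d (by simpa using h) (by simp)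

theorem A_loop (val : Int → List Int) (ks : List Int) (acc : List Int)
    (ds : List (Int × (Int × Int))) (s : Int) (hnd : ks.Nodup)
    (hfresh : ∀ k ∈ ks, (PySem.Dict.mk ds).contains k = false) :
    ks.foldl
      (fun (st : List Int × PySem.Dict Int (Int × Int) × Int) k =>
        (st.1 ++ val k, st.2.1.insert k (st.2.2, st.2.2 + PySem.List.len (val k)),
         st.2.2 + PySem.List.len (val k)))
      (acc, PySem.Dict.mk ds, s)
    = (acc ++ ks.flatMap val,
       PySem.Dict.mk (ds ++ spFrom val s ks),
       s + (ks.map (fun k => PySem.List.len (val k))).sum) := by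
  induction ks generalizing acc ds s with
  | nil => simp [spFrom]
  | cons k ks ih =>
    simp only [List.foldl_cons]
    rw [insert_fresh_append _ (hfresh k (by simp))]
    rw [ih (acc ++ val k) (ds ++ [(k, (s, s + PySem.List.len (val k)))]) _ hnd.of_cons]
    · simp [spFrom, List.append_assoc]
      ring
    · intro k' hk'
      have hne : k' ≠ k := by
        rintro rfl; exact (List.nodup_cons.mp hnd).1 hk'
      have := hfresh k' (List.mem_cons_of_mem _ hk')
      simp [PySem.Dict.contains] at this ⊢
      exact ⟨this, fun h => hne h.symm⟩

theorem B_offsets (ls : List Int) (acc : List Int) (t : Int) :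
    ls.foldl (fun (st : List Int × Int) n => (st.1 ++ [st.2 + n], st.2 + n)) (acc, t)
    = (acc ++ cumFrom t ls, t + ls.sum) := by
  induction ls generalizing acc t with
  | nil => simp [cumFrom]
  | cons n ns ih => simp [cumFrom, ih, List.append_assoc]; ring

theorem zip_cum (val : Int → List Int) (ks : List Int) (t : Int) :
    ks.zip (((t :: cumFrom t (ks.map (fun k => PySem.List.len (val k)))).zip
             (cumFrom t (ks.map (fun k => PySem.List.len (val k))))))
    = spFrom val t ks := by
  induction ks generalizing t with
  | nil => simp [cumFrom, spFrom]
  | cons k ks ih =>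
    simp only [List.map_cons, cumFrom, spFrom, List.zip_cons_cons]
    exact congrArg _ (ih _)

-- ===== VERDICT (by name: the statement is the Claim_ definition above) =====
theorem encode_routes_spec : Claim_equal_encode_routes := by
  intro rl _ hpre
  unfold Spec_encode_routes encode_routes encode_routes_alt
  simp only []
  have hkeys : PySem.Dict.keys (PySem.Dict.mk rl) = rl.map Prod.fst := by
    simp [PySem.Dict.keys]
  have hfresh : ∀ k ∈ PySem.Dict.keys (PySem.Dict.mk rl),
      (PySem.Dict.mk ([] : List (Int × (Int × Int)))).contains k = false := by
    intro k _; simp [PySem.Dict.contains]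
  rw [A_loop (fun k => (PySem.Dict.mk rl).getD k []) _ [] [] 0 (by rw [hkeys]; exact hpre) hfresh]
  rw [B_offsets]
  simp only [List.singleton_append]
  rw [List.tail_cons]
  rw [zip_cum (fun k => (PySem.Dict.mk rl).getD k []) _ 0]
  rfl
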